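-- pv_equiv track=rewrite | github.com/Concerned-Chris/Projects | team03_a4/puzzles.py | make_coords_hex
-- ===== SOURCE A (Python) =====
-- def hex_r(coord):
--     return coord[0], coord[1] + 1, coord[2] - 1
--
-- def hex_rd(coord):
--     return coord[0] + 1, coord[1], coord[2] - 1
--
-- def hex_ld(coord):
--     return coord[0] + 1, coord[1] - 1, coord[2]
--
-- def hex_l(coord):
--     return coord[0], coord[1] - 1, coord[2] + 1
--
-- def hex_lu(coord):
--     return coord[0] - 1, coord[1], coord[2] + 1
--
-- def hex_ru(coord):
--     return coord[0] - 1, coord[1] + 1, coord[2]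
--
-- def make_coords_hex(kind, row_number, column_number, column_number2, size):
--     coords = []
--     if kind == "row":
--         start = (1, size, 2 * size - 1)
--         for i in range(1, row_number):
--             if i < size:
--                 start = hex_ld(start)
--             else:
--                 start = hex_rd(start)
--         coords.append(start)
--         steps = (2 * size - 1) - abs(row_number - size)
--         for i in range(1, steps):
--             start = hex_r(start)
--             coords.append(start)
--     elif kind == "column":
--         start = (2 * size - 1, 1, size)
--         for i in range(1, column_number):
--             if i < size:
--                 start = hex_r(start)
--             else:
--                 start = hex_ru(start)
--         coords.append(start)
--         steps = (2 * size - 1) - abs(column_number - size)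
--         for i in range(1, steps):
--             start = hex_lu(start)
--             coords.append(start)
--     else:
--         start = (size, 2 * size - 1, 1)
--         for i in range(1, column_number2):
--             if i < size:
--                 start = hex_lu(start)
--             else:
--                 start = hex_l(start)
--         coords.append(start)
--         steps = (2 * size - 1) - abs(column_number2 - size)
--         for i in range(1, steps):
--             start = hex_ld(start)
--             coords.append(start)
--     return coords
-- ===== SOURCE B (Python) =====
-- def _addv(a, b):
--     return (a[0] + b[0], a[1] + b[1], a[2] + b[2])
--
-- def _smul(c, v):
--     return (c * v[0], c * v[1], c * v[2])
--
-- def _line(seed, f_off, g_off, d_off, pos, size):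
--     # closed-form start: k applications of f_off, n-k of g_off
--     n = max(pos - 1, 0)
--     k = min(n, max(size - 1, 0))
--     start = _addv(seed, _addv(_smul(k, f_off), _smul(n - k, g_off)))
--     steps = (2 * size - 1) - abs(pos - size)
--     return [_addv(start, _smul(j, d_off)) for j in range(max(steps, 1))]
--
-- def make_coords_hex(kind, row_number, column_number, column_number2, size):
--     if kind == "row":
--         return _line((1, size, 2 * size - 1), (1, -1, 0), (1, 0, -1), (0, 1, -1), row_number, size)
--     elif kind == "column":
--         return _line((2 * size - 1, 1, size), (0, 1, -1), (-1, 1, 0), (-1, 0, 1), column_number, size)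
--     else:
--         return _line((size, 2 * size - 1, 1), (-1, 0, 1), (0, -1, 1), (1, -1, 0), column_number2, size)
-- ===== Notes on version B (the rewrite author's own statement) =====
-- stated objective: simpler
-- what changed: B replaces A's two mutating loops per branch (repeated per-step hex moves building a running coordinate) by a closed-form vector formula: start = seed + k*f_off + (n-k)*g_off and cell j = start + j*d_off, built in one comprehension.
import Mathlib
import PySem

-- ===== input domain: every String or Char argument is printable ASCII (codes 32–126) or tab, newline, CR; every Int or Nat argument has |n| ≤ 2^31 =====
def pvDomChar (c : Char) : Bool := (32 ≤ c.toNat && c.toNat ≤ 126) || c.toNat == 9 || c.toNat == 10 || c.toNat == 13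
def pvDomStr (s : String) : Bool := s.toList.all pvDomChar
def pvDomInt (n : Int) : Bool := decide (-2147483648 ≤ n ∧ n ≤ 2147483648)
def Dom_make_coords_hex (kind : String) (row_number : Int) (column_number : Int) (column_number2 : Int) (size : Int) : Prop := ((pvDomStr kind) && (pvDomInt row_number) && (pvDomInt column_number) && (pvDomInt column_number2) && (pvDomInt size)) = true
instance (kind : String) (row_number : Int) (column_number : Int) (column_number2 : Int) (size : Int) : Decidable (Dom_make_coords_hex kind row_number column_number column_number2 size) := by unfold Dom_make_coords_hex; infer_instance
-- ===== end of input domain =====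

-- B replaces A's two mutating loops per branch by closed-form vector arithmetic:
-- the start coordinate is seed + k·f + (n-k)·g and each cell is start + j·d (simpler, no running state).

-- ===== PORT A =====
def hex_r (c : Int × Int × Int) : Int × Int × Int := (c.1, c.2.1 + 1, c.2.2 - 1)
def hex_rd (c : Int × Int × Int) : Int × Int × Int := (c.1 + 1, c.2.1, c.2.2 - 1)
def hex_ld (c : Int × Int × Int) : Int × Int × Int := (c.1 + 1, c.2.1 - 1, c.2.2)
def hex_l (c : Int × Int × Int) : Int × Int × Int := (c.1, c.2.1 - 1, c.2.2 + 1)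
def hex_lu (c : Int × Int × Int) : Int × Int × Int := (c.1 - 1, c.2.1, c.2.2 + 1)
def hex_ru (c : Int × Int × Int) : Int × Int × Int := (c.1 - 1, c.2.1 + 1, c.2.2)

def make_coords_hex (kind : String) (row_number : Int) (column_number : Int) (column_number2 : Int) (size : Int) : List (Int × Int × Int) :=
  if kind = "row" then
    let start := ((1 : Int), size, 2 * size - 1)
    let start := (PySem.List.pyRange 1 row_number 1).foldl
      (fun s i => if i < size then hex_ld s else hex_rd s) start
    let coords := [start]
    let steps := (2 * size - 1) - |row_number - size|
    let p := (PySem.List.pyRange 1 steps 1).foldl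
      (fun (p : (Int × Int × Int) × List (Int × Int × Int)) _ =>
        let s := hex_r p.1; (s, p.2 ++ [s])) (start, coords)
    p.2
  else if kind = "column" then
    let start := ((2 * size - 1 : Int), 1, size)
    let start := (PySem.List.pyRange 1 column_number 1).foldl
      (fun s i => if i < size then hex_r s else hex_ru s) start
    let coords := [start]
    let steps := (2 * size - 1) - |column_number - size|
    let p := (PySem.List.pyRange 1 steps 1).foldl
      (fun (p : (Int × Int × Int) × List (Int × Int × Int)) _ =>
        let s := hex_lu p.1; (s, p.2 ++ [s])) (start, coords)
    p.2
  else
    let start := ((size : Int), 2 * size - 1, 1)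
    let start := (PySem.List.pyRange 1 column_number2 1).foldl
      (fun s i => if i < size then hex_lu s else hex_l s) start
    let coords := [start]
    let steps := (2 * size - 1) - |column_number2 - size|
    let p := (PySem.List.pyRange 1 steps 1).foldl
      (fun (p : (Int × Int × Int) × List (Int × Int × Int)) _ =>
        let s := hex_ld p.1; (s, p.2 ++ [s])) (start, coords)
    p.2

-- ===== PORT B =====
def addv (a b : Int × Int × Int) : Int × Int × Int := (a.1 + b.1, a.2.1 + b.2.1, a.2.2 + b.2.2)
def smul (c : Int) (v : Int × Int × Int) : Int × Int × Int := (c * v.1, c * v.2.1, c * v.2.2)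

def lineAlt (seed f_off g_off d_off : Int × Int × Int) (pos size : Int) : List (Int × Int × Int) :=
  let n := max (pos - 1) 0
  let k := min n (max (size - 1) 0)
  let start := addv seed (addv (smul k f_off) (smul (n - k) g_off))
  let steps := (2 * size - 1) - |pos - size|
  (PySem.List.pyRange 0 (max steps 1) 1).map (fun j => addv start (smul j d_off))

def make_coords_hex_alt (kind : String) (row_number : Int) (column_number : Int) (column_number2 : Int) (size : Int) : List (Int × Int × Int) :=
  if kind = "row" then
    lineAlt (1, size, 2 * size - 1) (1, -1, 0) (1, 0, -1) (0, 1, -1) row_number size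
  else if kind = "column" then
    lineAlt (2 * size - 1, 1, size) (0, 1, -1) (-1, 1, 0) (-1, 0, 1) column_number size
  else
    lineAlt (size, 2 * size - 1, 1) (-1, 0, 1) (0, -1, 1) (1, -1, 0) column_number2 size

-- ===== PRECONDITION & SPEC =====
def Spec_make_coords_hex (kind : String) (row_number : Int) (column_number : Int) (column_number2 : Int) (size : Int) (out : List (Int × Int × Int)) : Prop := out = make_coords_hex_alt kind row_number column_number column_number2 size
instance (kind : String) (row_number : Int) (column_number : Int) (column_number2 : Int) (size : Int) (out : List (Int × Int × Int)) : Decidable (Spec_make_coords_hex kind row_number column_number column_number2 size out) := by unfold Spec_make_coords_hex; infer_instance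

-- ===== CLAIM (what is proved, stated in full; the proofs are below) =====
def Claim_equal_make_coords_hex : Prop := ∀ (kind : String) (row_number : Int) (column_number : Int) (column_number2 : Int) (size : Int), Dom_make_coords_hex kind row_number column_number column_number2 size → Spec_make_coords_hex kind row_number column_number column_number2 size (make_coords_hex kind row_number column_number column_number2 size)

-- ===== LEMMAS AND PROOFS =====

theorem addv_smul_zero (s v : Int × Int × Int) : addv s (smul 0 v) = s := by
  obtain ⟨a, b, c⟩ := s; simp [addv, smul]

-- closed form of A's first loop (k applications of f_off, rest g_off)
theorem loop1_closed (size : Int) (vf vg : Int × Int × Int) (seed : Int × Int × Int) :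
    ∀ (n : Nat),
    (PySem.List.pyRange 1 ((n : Int) + 1) 1).foldl
      (fun s i => if i < size then addv s vf else addv s vg) seed
    = addv seed (addv (smul (min (n : Int) (max (size - 1) 0)) vf)
                      (smul ((n : Int) - min (n : Int) (max (size - 1) 0)) vg)) := by
  intro n
  induction n with
  | zero =>
    simp [PySem.List.pyRange_one_eq_nil, addv_smul_zero]
  | succ m ih =>
    rw [show ((m + 1 : Nat) : Int) + 1 = ((m : Int) + 1) + 1 by push_cast; ring,
        PySem.List.pyRange_one_succ_right (by omega), List.foldl_append, ih]
    simp only [List.foldl_cons, List.foldl_nil]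
    obtain ⟨sa, sb, sc⟩ := seed
    obtain ⟨fa, fb, fc⟩ := vf
    obtain ⟨ga, gb, gc⟩ := vg
    push_cast
    by_cases h : (m : Int) + 1 < size
    · have hk : min ((m : Int) + 1) (max (size - 1) 0) = min (m : Int) (max (size - 1) 0) + 1 := by
        omega
      rw [if_pos h, hk]
      simp only [addv, smul, Prod.mk.injEq]
      refine ⟨by ring, by ring, by ring⟩
    · have hk : min ((m : Int) + 1) (max (size - 1) 0) = min (m : Int) (max (size - 1) 0) := by
        omega
      rw [if_neg h, hk]
      simp only [addv, smul, Prod.mk.injEq]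
      refine ⟨by ring, by ring, by ring⟩

-- same closed form stated for an Int upper bound m (empty loop when m ≤ 1)
theorem loop1_int (size : Int) (vf vg seed : Int × Int × Int) (m : Int) :
    (PySem.List.pyRange 1 m 1).foldl
      (fun s i => if i < size then addv s vf else addv s vg) seed
    = addv seed (addv (smul (min (max (m - 1) 0) (max (size - 1) 0)) vf)
                      (smul (max (m - 1) 0 - min (max (m - 1) 0) (max (size - 1) 0)) vg)) := by
  by_cases hm : m ≤ 1
  · rw [PySem.List.pyRange_one_eq_nil hm]
    have h0 : max (m - 1) 0 = 0 := by omega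
    simp [h0, addv_smul_zero]
  · have hn : m = ((m - 1).toNat : Int) + 1 := by omega
    rw [hn, loop1_closed]
    have h1 : ((m - 1).toNat : Int) = max (m - 1) 0 := by omega
    rw [h1, show max (max (m - 1) 0 + 1 - 1) 0 = max (m - 1) 0 from by omega]

-- closed form of A's second loop: running coordinate plus accumulated list
theorem loop2_closed (v : Int × Int × Int) (s0 : Int × Int × Int) :
    ∀ (n : Nat) (acc : List (Int × Int × Int)),
    (PySem.List.pyRange 1 ((n : Int) + 1) 1).foldl
      (fun (p : (Int × Int × Int) × List (Int × Int × Int)) _ =>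
        (addv p.1 v, p.2 ++ [addv p.1 v])) (s0, acc)
    = (addv s0 (smul (n : Int) v),
       acc ++ (PySem.List.pyRange 1 ((n : Int) + 1) 1).map (fun j => addv s0 (smul j v))) := by
  intro n
  induction n with
  | zero =>
    intro acc; simp [PySem.List.pyRange_one_eq_nil, addv_smul_zero]
  | succ m ih =>
    intro acc
    rw [show ((m + 1 : Nat) : Int) + 1 = ((m : Int) + 1) + 1 by push_cast; ring,
        PySem.List.pyRange_one_succ_right (by omega), List.foldl_append, ih,
        List.map_append]
    simp only [List.foldl_cons, List.foldl_nil, List.map_cons, List.map_nil, List.append_assoc]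
    push_cast
    have hstep : addv (addv s0 (smul (m : Int) v)) v = addv s0 (smul ((m : Int) + 1) v) := by
      obtain ⟨a, b, c⟩ := s0; obtain ⟨x, y, z⟩ := v
      simp only [addv, smul, Prod.mk.injEq]
      refine ⟨by ring, by ring, by ring⟩
    rw [hstep]

-- [s0] ++ (map over range 1..steps) is the map over range 0..max steps 1
theorem prepend_map (v s0 : Int × Int × Int) (steps : Int) :
    s0 :: (PySem.List.pyRange 1 steps 1).map (fun j => addv s0 (smul j v))
    = (PySem.List.pyRange 0 (max steps 1) 1).map (fun j => addv s0 (smul j v)) := by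
  have hc : PySem.List.pyRange 0 (max steps 1) 1 = 0 :: PySem.List.pyRange (0 + 1) (max steps 1) 1 :=
    PySem.List.pyRange_one_cons (by omega)
  rw [hc, show (0 : Int) + 1 = 1 from by ring]
  simp only [List.map_cons, addv_smul_zero]
  by_cases h : steps ≤ 1
  · rw [PySem.List.pyRange_one_eq_nil h, PySem.List.pyRange_one_eq_nil (by omega)]
  · rw [show max steps 1 = steps from by omega]

-- one branch of A equals one branch of B
theorem branch_eq (size pos : Int) (seed vf vg vd : Int × Int × Int) :
    (let start := (PySem.List.pyRange 1 pos 1).foldl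
        (fun s i => if i < size then addv s vf else addv s vg) seed
     let coords := [start]
     let steps := (2 * size - 1) - |pos - size|
     let p := (PySem.List.pyRange 1 steps 1).foldl
       (fun (p : (Int × Int × Int) × List (Int × Int × Int)) _ =>
         (addv p.1 vd, p.2 ++ [addv p.1 vd])) (start, coords)
     p.2)
    = lineAlt seed vf vg vd pos size := by
  simp only [lineAlt, loop1_int]
  set s0 := addv seed (addv (smul (min (max (pos - 1) 0) (max (size - 1) 0)) vf)
      (smul (max (pos - 1) 0 - min (max (pos - 1) 0) (max (size - 1) 0)) vg)) with hs0
  set steps := (2 * size - 1) - |pos - size| with hst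
  by_cases h : steps ≤ 1
  · rw [PySem.List.pyRange_one_eq_nil h]
    simp only [List.foldl_nil]
    rw [← prepend_map vd s0 steps, PySem.List.pyRange_one_eq_nil h]
    simp
  · have hn : steps = ((steps - 1).toNat : Int) + 1 := by omega
    rw [hn, loop2_closed]
    simp only
    rw [← hn, ← prepend_map vd s0 steps]
    simp

-- ===== VERDICT (by name: the statement is the Claim_ definition above) =====
theorem make_coords_hex_spec : Claim_equal_make_coords_hex := by
  intro kind row_number column_number column_number2 size _
  show make_coords_hex kind row_number column_number column_number2 size
      = make_coords_hex_alt kind row_number column_number column_number2 size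
  unfold make_coords_hex make_coords_hex_alt
  have hld : ∀ s : Int × Int × Int, hex_ld s = addv s (1, -1, 0) := by
    intro ⟨a, b, c⟩; simp [hex_ld, addv, sub_eq_add_neg]
  have hrd : ∀ s : Int × Int × Int, hex_rd s = addv s (1, 0, -1) := by
    intro ⟨a, b, c⟩; simp [hex_rd, addv, sub_eq_add_neg]
  have hr : ∀ s : Int × Int × Int, hex_r s = addv s (0, 1, -1) := by
    intro ⟨a, b, c⟩; simp [hex_r, addv, sub_eq_add_neg]
  have hru : ∀ s : Int × Int × Int, hex_ru s = addv s (-1, 1, 0) := by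
    intro ⟨a, b, c⟩; simp [hex_ru, addv, sub_eq_add_neg]
  have hlu : ∀ s : Int × Int × Int, hex_lu s = addv s (-1, 0, 1) := by
    intro ⟨a, b, c⟩; simp [hex_lu, addv, sub_eq_add_neg]
  have hl : ∀ s : Int × Int × Int, hex_l s = addv s (0, -1, 1) := by
    intro ⟨a, b, c⟩; simp [hex_l, addv, sub_eq_add_neg]
  split
  · simp only [hld, hrd, hr]
    exact branch_eq size row_number (1, size, 2 * size - 1) (1, -1, 0) (1, 0, -1) (0, 1, -1)
  · split
    · simp only [hr, hru, hlu]
      exact branch_eq size column_number (2 * size - 1, 1, size) (0, 1, -1) (-1, 1, 0) (-1, 0, 1)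
    · simp only [hlu, hl, hld]
      exact branch_eq size column_number2 (size, 2 * size - 1, 1) (-1, 0, 1) (0, -1, 1) (1, -1, 0)
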